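-- pv_equiv track=rewrite | github.com/grahama1970/agent-skills | skills/ingest-movie/movie_ingest_monolith.py | infer_emotion_from_tags
-- ===== SOURCE A (Python) =====
-- from typing import Optional, Sequence, Dict, Any
-- from collections import Counter
--
-- TAG_TO_EMOTION = {
--     # Rage - explosive fury (DDL model)
--     "rage": "rage",
--     "rage_candidate": "rage",
--     # Anger - cold calculated (Pacino model)
--     "anger": "anger",
--     "anger_candidate": "anger",
--     "shout": "anger",
--     # Sorrow - stoic loss (Katsumoto model)
--     "cry": "sorrow",
--     "sob": "sorrow",
--     "sigh": "sorrow",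
--     "whisper": "sorrow",  # Quiet grief
--     "whisper_candidate": "sorrow",
--     "breath": "sorrow",  # Heavy breathing from grief
--     # Regret - cynical reflection (Carlin model)
--     # Note: regret is detected via explicit --emotion flag or text analysis
--     # Camaraderie - warrior bond (Stilgar model)
--     "laugh": "camaraderie",  # Shared laughter = bond
-- }
--
-- def infer_emotion_from_tags(tags: list[str], fallback: Optional[str] = None) -> Optional[str]:
--     if fallback:
--         return fallback.lower()
--     mapped = [TAG_TO_EMOTION.get(tag.lower()) for tag in tags]
--     mapped = [m for m in mapped if m]
--     if not mapped:
--         return None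
--     counts = Counter(mapped)
--     priority = ["rage", "anger", "humor", "regret", "respect"]
--     sorted_emotions = sorted(
--         counts.keys(),
--         key=lambda e: (-counts[e], priority.index(e) if e in priority else len(priority)),
--     )
--     return sorted_emotions[0]
-- ===== SOURCE B (Python) =====
-- from typing import Optional
--
-- TAG_TO_EMOTION = {
--     "rage": "rage",
--     "rage_candidate": "rage",
--     "anger": "anger",
--     "anger_candidate": "anger",
--     "shout": "anger",
--     "cry": "sorrow",
--     "sob": "sorrow",
--     "sigh": "sorrow",
--     "whisper": "sorrow",
--     "whisper_candidate": "sorrow",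
--     "breath": "sorrow",
--     "laugh": "camaraderie",
-- }
--
-- def infer_emotion_from_tags(tags: list[str], fallback: Optional[str] = None) -> Optional[str]:
--     if fallback:
--         return fallback.lower()
--     priority = ["rage", "anger", "humor", "regret", "respect"]
--     counts: dict[str, int] = {}
--     for tag in tags:
--         e = TAG_TO_EMOTION.get(tag.lower())
--         if e:
--             counts[e] = counts.get(e, 0) + 1
--     best = None
--     best_key = None
--     for e in counts:
--         key = (-counts[e], priority.index(e) if e in priority else len(priority))
--         if best is None or key < best_key:
--             best, best_key = e, key
--     return best
-- ===== Notes on version B (the rewrite author's own statement) =====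
-- stated objective: simpler
-- what changed: Replaces A's map/filter/Counter/sort-then-take-head pipeline by one counting pass over the tags and a sort-free single-pass argmax over the distinct emotions in first-occurrence order (strict-replace preserves the stable-sort tie-break).
import Mathlib
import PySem

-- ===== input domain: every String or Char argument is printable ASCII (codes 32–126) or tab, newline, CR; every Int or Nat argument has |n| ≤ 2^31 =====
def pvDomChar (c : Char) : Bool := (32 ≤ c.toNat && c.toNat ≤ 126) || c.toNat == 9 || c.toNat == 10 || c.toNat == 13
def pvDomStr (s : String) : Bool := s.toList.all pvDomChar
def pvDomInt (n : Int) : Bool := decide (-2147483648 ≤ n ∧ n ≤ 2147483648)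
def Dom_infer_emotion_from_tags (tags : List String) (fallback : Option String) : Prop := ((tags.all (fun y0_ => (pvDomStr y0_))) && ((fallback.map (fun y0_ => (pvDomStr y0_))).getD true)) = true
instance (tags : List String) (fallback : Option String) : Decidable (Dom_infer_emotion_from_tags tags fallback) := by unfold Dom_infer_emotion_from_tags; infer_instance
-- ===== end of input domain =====

-- B replaces A's map/filter/Counter/sort pipeline by one counting pass over the tags and a
-- sort-free single-pass argmax over the distinct emotions (objective: simpler; same return value).

-- shared data: the module-level TAG_TO_EMOTION dict
def tagToEmotion : PySem.Dict String String := PySem.Dict.ofList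
  [("rage", "rage"), ("rage_candidate", "rage"),
   ("anger", "anger"), ("anger_candidate", "anger"), ("shout", "anger"),
   ("cry", "sorrow"), ("sob", "sorrow"), ("sigh", "sorrow"),
   ("whisper", "sorrow"), ("whisper_candidate", "sorrow"), ("breath", "sorrow"),
   ("laugh", "camaraderie")]

-- Python truthiness of an Optional[str]
def pyTruthyStrOpt (m : Option String) : Bool :=
  match m with
  | none => false
  | some s => !s.toList.isEmpty

-- ===== PORT A =====
-- A's body after the fallback guard: map, filter-truthy, Counter, sorted by (-count, priority rank), take [0]
def inferA_rest (tags : List String) : Option String :=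
  let mapped0 := tags.map (fun tag => tagToEmotion.get? (PySem.Str.lower tag))
  let mapped := (mapped0.filter pyTruthyStrOpt).reduceOption
  if mapped.isEmpty then none
  else
    let counts := PySem.Dict.counter mapped
    let priority := ["rage", "anger", "humor", "regret", "respect"]
    let sortedEmotions := PySem.List.sorted2 counts.keys
      (fun e => -(counts.getD e 0))
      (fun e => match PySem.List.index? priority e with
                | some i => (i : Int)
                | none => (priority.length : Int))
    PySem.List.pyGet? sortedEmotions 0

def infer_emotion_from_tags (tags : List String) (fallback : Option String) : Option String :=
  match fallback with
  | some f => if f.toList.isEmpty then inferA_rest tags else some (PySem.Str.lower f)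
  | none => inferA_rest tags

-- ===== PORT B =====
-- B's body after the fallback guard: one counting pass, then a single-pass argmax over counts' keys
def inferB_rest (tags : List String) : Option String :=
  let priority := ["rage", "anger", "humor", "regret", "respect"]
  let counts := tags.foldl (fun d tag =>
      match tagToEmotion.get? (PySem.Str.lower tag) with
      | some e => if e.toList.isEmpty then d else d.insert e (d.getD e 0 + 1)
      | none => d) (PySem.Dict.empty : PySem.Dict String Int)
  let best := counts.keys.foldl (fun acc e =>
      let k : Int × Int := (-(counts.getD e 0),
        match PySem.List.index? priority e with
        | some i => (i : Int)
        | none => (priority.length : Int))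
      match acc with
      | none => some (e, k)
      | some (b, bk) =>
        if k.1 < bk.1 ∨ (k.1 = bk.1 ∧ k.2 < bk.2) then some (e, k) else some (b, bk)) none
  best.map Prod.fst

def infer_emotion_from_tags_alt (tags : List String) (fallback : Option String) : Option String :=
  match fallback with
  | some f => if f.toList.isEmpty then inferB_rest tags else some (PySem.Str.lower f)
  | none => inferB_rest tags

-- ===== PRECONDITION & SPEC =====
def Spec_infer_emotion_from_tags (tags : List String) (fallback : Option String) (out : Option String) : Prop := out = infer_emotion_from_tags_alt tags fallback
instance (tags : List String) (fallback : Option String) (out : Option String) : Decidable (Spec_infer_emotion_from_tags tags fallback out) := by unfold Spec_infer_emotion_from_tags; infer_instance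

-- ===== CLAIM (what is proved, stated in full; the proofs are below) =====
def Claim_equal_infer_emotion_from_tags : Prop := ∀ (tags : List String) (fallback : Option String), Dom_infer_emotion_from_tags tags fallback → Spec_infer_emotion_from_tags tags fallback (infer_emotion_from_tags tags fallback)

-- ===== LEMMAS AND PROOFS =====

-- the effective tag → counted-emotion map both pipelines compute
def tagStep (t : String) : Option String :=
  match tagToEmotion.get? (PySem.Str.lower t) with
  | some e => if e.toList.isEmpty then none else some e
  | none => none

lemma mapped_eq_filterMap (tags : List String) :
    ((tags.map (fun tag => tagToEmotion.get? (PySem.Str.lower tag))).filter pyTruthyStrOpt).reduceOption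
      = tags.filterMap tagStep := by
  induction tags with
  | nil => rfl
  | cons t ts ih =>
    have hstep : tagStep t = match tagToEmotion.get? (PySem.Str.lower t) with
        | some e => if e.toList.isEmpty then none else some e
        | none => none := rfl
    simp only [List.map_cons, List.filter_cons, List.filterMap_cons, hstep]
    cases h : tagToEmotion.get? (PySem.Str.lower t) with
    | none =>
      have : pyTruthyStrOpt none = false := rfl
      simp only [this, Bool.false_eq_true, if_false, ih]
    | some e =>
      have : pyTruthyStrOpt (some e) = !e.toList.isEmpty := rfl
      by_cases he : e.toList.isEmpty
      · simp only [this, he, Bool.not_true, Bool.false_eq_true, if_false, if_true, ih]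
      · simp only [this, he, Bool.not_false, Bool.false_eq_true, if_false, if_true,
          List.reduceOption_cons_of_some, ih]

lemma counts_eq (tags : List String) :
    PySem.Dict.counter (tags.filterMap tagStep)
      = tags.foldl (fun d tag =>
          match tagToEmotion.get? (PySem.Str.lower tag) with
          | some e => if e.toList.isEmpty then d else d.insert e (d.getD e 0 + 1)
          | none => d) (PySem.Dict.empty : PySem.Dict String Int) := by
  rw [PySem.Dict.counter_eq_foldl, List.foldl_filterMap]
  apply PySem.List.foldl_congr_mem
  intro d t _
  simp only [tagStep, PySem.Dict.modify]
  cases tagToEmotion.get? (PySem.Str.lower t) with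
  | none => rfl
  | some e => by_cases he : e.toList.isEmpty <;> simp [he]

-- head of an insertion-sort fold = the strict-replace running minimum
lemma head_foldl_insertBy {α : Type} (before : α → α → Bool) (xs : List α) (acc : List α) :
    (xs.foldl (fun a x => PySem.List.insertBy before x a) acc).head?
      = xs.foldl (fun o x =>
          match o with
          | none => some x
          | some m => if before x m then some x else some m) acc.head? := by
  induction xs generalizing acc with
  | nil => rfl
  | cons x xs ih =>
    simp only [List.foldl_cons]
    rw [ih]
    congr 1
    cases acc with
    | nil => rfl
    | cons y ys =>
      simp only [PySem.List.insertBy, List.head?_cons]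
      by_cases h : before x y <;> simp [h]

-- carrying (best, best_key) and comparing stored keys = recomputing keys each step
lemma pairfold_eq {α : Type} (k1 k2 : α → Int) (ks : List α) (o : Option α) :
    (ks.foldl (fun acc e =>
        let k : Int × Int := (k1 e, k2 e)
        match acc with
        | none => some (e, k)
        | some (b, bk) =>
          if k.1 < bk.1 ∨ (k.1 = bk.1 ∧ k.2 < bk.2) then some (e, k) else some (b, bk))
      (o.map (fun m => (m, (k1 m, k2 m))))).map Prod.fst
    = ks.foldl (fun o x =>
        match o with
        | none => some x
        | some m => if (decide (k1 x < k1 m) || !decide (k1 m < k1 x) && decide (k2 x < k2 m)) = true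
                    then some x else some m) o := by
  induction ks generalizing o with
  | nil => cases o <;> rfl
  | cons e es ih =>
    simp only [List.foldl_cons]
    cases o with
    | none => exact ih (some e)
    | some m =>
      have hcond : (k1 e < k1 m ∨ (k1 e = k1 m ∧ k2 e < k2 m)) ↔
          (decide (k1 e < k1 m) || !decide (k1 m < k1 e) && decide (k2 e < k2 m)) = true := by
        simp only [Bool.or_eq_true, Bool.and_eq_true, Bool.not_eq_true', decide_eq_true_eq,
          decide_eq_false_iff_not]
        omega
      simp only [Option.map_some]
      by_cases h : k1 e < k1 m ∨ (k1 e = k1 m ∧ k2 e < k2 m)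
      · rw [if_pos h, if_pos (hcond.mp h)]
        exact ih (some e)
      · rw [if_neg h, if_neg (fun hb => h (hcond.mpr hb))]
        exact ih (some m)

lemma pyGet?_zero_eq_head? {α : Type} (xs : List α) :
    PySem.List.pyGet? xs 0 = xs.head? := by
  cases xs <;> simp [PySem.List.pyGet?, PySem.List.pyIdx?]

lemma rest_eq (tags : List String) : inferA_rest tags = inferB_rest tags := by
  simp only [inferA_rest, inferB_rest]
  rw [mapped_eq_filterMap, ← counts_eq]
  set mapped := tags.filterMap tagStep with hm
  by_cases hempty : mapped.isEmpty
  · rw [if_pos hempty]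
    rw [List.isEmpty_iff] at hempty
    rw [hempty]
    rfl
  · rw [if_neg hempty]
    rw [pyGet?_zero_eq_head?]
    simp only [PySem.List.sorted2]
    rw [head_foldl_insertBy]
    simp only [Bool.false_eq_true, if_false, List.head?_nil]
    rw [← pairfold_eq (fun e => -(PySem.Dict.getD (PySem.Dict.counter mapped) e 0))
        (fun e => match PySem.List.index? ["rage", "anger", "humor", "regret", "respect"] e with
                  | some i => (i : Int)
                  | none => ((["rage", "anger", "humor", "regret", "respect"] : List String).length : Int))
        (PySem.Dict.counter mapped).keys none]
    simp only [Option.map_none]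
    congr 1
    apply PySem.List.foldl_congr_mem
    intro acc e _
    rcases acc with _ | ⟨b, bk⟩ <;> rfl

-- ===== VERDICT (by name: the statement is the Claim_ definition above) =====
theorem infer_emotion_from_tags_spec : Claim_equal_infer_emotion_from_tags := by
  intro tags fallback _
  show infer_emotion_from_tags tags fallback = infer_emotion_from_tags_alt tags fallback
  cases fallback with
  | none => exact rest_eq tags
  | some f =>
    simp only [infer_emotion_from_tags, infer_emotion_from_tags_alt]
    split <;> [exact rest_eq tags; rfl]
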